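-- pv_equiv track=rewrite | github.com/pengjichengbest/Algorithm | new_problem.py | canSeePersonsCount
-- ===== SOURCE A (Python) =====
-- def canSeePersonsCount(heights):
--     stack = []
--     ans = [0] * len(heights)
--     for i in range(len(heights) - 1, -1, -1):
--         res = 0
--         while stack and heights[stack[-1]] < heights[i]:
--             res += 1
--             stack.pop()
--         if stack:
--             res += 1
--         ans[i] = res
--         stack.append(i)
--     return ans
-- ===== SOURCE B (Python) =====
-- def canSeePersonsCount(heights):
--     def visible(hi, rest):
--         cnt = 0
--         curr = None
--         for hj in rest:
--             if curr is None or hj >= curr: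
--                 cnt += 1
--                 curr = hj
--             if hj >= hi:
--                 break
--         return cnt
--     return [visible(heights[i], heights[i + 1:]) for i in range(len(heights))]
-- ===== Notes on version B (the rewrite author's own statement) =====
-- stated objective: simpler
-- what changed: Replaces the right-to-left monotonic index stack with a direct per-index rightward scan that keeps a running maximum and stops at the first person at least as tall, removing the shared mutable stack and the ans-array backfilling.
import Mathlib
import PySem

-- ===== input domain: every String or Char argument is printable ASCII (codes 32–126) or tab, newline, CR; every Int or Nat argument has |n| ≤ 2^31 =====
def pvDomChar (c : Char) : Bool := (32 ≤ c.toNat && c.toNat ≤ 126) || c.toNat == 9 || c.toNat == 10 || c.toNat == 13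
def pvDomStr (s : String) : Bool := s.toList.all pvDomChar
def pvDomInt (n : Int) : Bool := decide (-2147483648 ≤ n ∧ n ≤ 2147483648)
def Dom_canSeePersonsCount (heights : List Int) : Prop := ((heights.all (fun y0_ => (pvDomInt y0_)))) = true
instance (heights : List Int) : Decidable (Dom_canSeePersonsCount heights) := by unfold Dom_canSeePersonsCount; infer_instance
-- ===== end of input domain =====

-- B replaces A's right-to-left monotonic index stack by a per-index rightward scan with a
-- running maximum (alternative algorithm, same return value; no mutation involved).

-- ===== PORT A =====
-- the while-loop 'while stack and heights[stack[-1]] < heights[i]: res += 1; stack.pop()';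
-- the Python stack's top (its end) is the HEAD of this list, so stack[-1] is the head and
-- pop/append act on the head; indices on the stack are always in range, so pyGetD's default
-- is never consulted.
def csppPop (heights : List Int) (x : Int) : List Int → Int → Int × List Int
  | [], res => (res, [])
  | j :: s, res =>
      if PySem.List.pyGetD heights j 0 < x then csppPop heights x s (res + 1)
      else (res, j :: s)

-- one iteration of 'for i in range(len(heights) - 1, -1, -1)': state = (stack, ans)
def csppStep (heights : List Int) (st : List Int × List Int) (i : Int) : List Int × List Int :=
  let r1 := csppPop heights (PySem.List.pyGetD heights i 0) st.1 0
  let res := if r1.2 = [] then r1.1 else r1.1 + 1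
  (i :: r1.2, st.2.set i.toNat res)

def canSeePersonsCount (heights : List Int) : List Int :=
  ((PySem.List.pyRange ((heights.length : Int) - 1) (-1) (-1)).foldl (csppStep heights)
      ([], List.replicate heights.length 0)).2

-- ===== PORT B =====
-- 'visible(hi, rest)': scan rest keeping cnt and the running maximum curr (None = not seen yet);
-- count hj when curr is None or hj >= curr, stop after the first hj >= hi.
def csppVisible (hi : Int) : Option Int → Int → List Int → Int
  | _, cnt, [] => cnt
  | curr, cnt, hj :: rest =>
      let p : Bool := match curr with | none => true | some m => decide (m ≤ hj)
      let cnt' := if p then cnt + 1 else cnt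
      let curr' := if p then some hj else curr
      if hi ≤ hj then cnt' else csppVisible hi curr' cnt' rest

-- '[visible(heights[i], heights[i+1:]) for i in range(len(heights))]'
def canSeePersonsCount_alt (heights : List Int) : List Int :=
  (PySem.List.pyRange 0 (heights.length : Int) 1).map
    (fun i => csppVisible (PySem.List.pyGetD heights i 0) none 0
        (PySem.List.slice heights (some (i + 1)) none))

-- ===== PRECONDITION & SPEC =====
def Spec_canSeePersonsCount (heights : List Int) (out : List Int) : Prop := out = canSeePersonsCount_alt heights
instance (heights : List Int) (out : List Int) : Decidable (Spec_canSeePersonsCount heights out) := by unfold Spec_canSeePersonsCount; infer_instance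

-- ===== CLAIM (what is proved, stated in full; the proofs are below) =====
def Claim_equal_canSeePersonsCount : Prop := ∀ (heights : List Int), Dom_canSeePersonsCount heights → Spec_canSeePersonsCount heights (canSeePersonsCount heights)

-- ===== LEMMAS AND PROOFS =====

-- heights carried by A's stack, top first: the weak left-to-right maxima of the suffix
def csppChain : List Int → List Int
  | [] => []
  | x :: r => x :: (csppChain r).dropWhile (fun a => decide (a < x))

-- A's answer for height x over a stack whose heights are st
def csppF (x : Int) (st : List Int) : Int :=
  ((st.takeWhile (fun a => decide (a < x))).length : Int) +
  (if st.dropWhile (fun a => decide (a < x)) = [] then 0 else 1)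

-- common reference result
def csppAns : List Int → List Int
  | [] => []
  | x :: r => csppF x (csppChain r) :: csppAns r

lemma cspp_dropWhile_dropWhile {p q : Int → Bool} (h : ∀ a, q a = true → p a = true) :
    ∀ l : List Int, (l.dropWhile q).dropWhile p = l.dropWhile p := by
  intro l
  induction l with
  | nil => simp
  | cons a l ih =>
    by_cases hq : q a = true
    · rw [List.dropWhile_cons_of_pos hq, List.dropWhile_cons_of_pos (h a hq), ih]
    · rw [List.dropWhile_cons_of_neg hq]

lemma cspp_dropWhile_eq_drop {p : Int → Bool} :
    ∀ l : List Int, l.dropWhile p = l.drop (l.takeWhile p).length := by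
  intro l
  induction l with
  | nil => simp
  | cons a l ih =>
    by_cases hp : p a = true
    · rw [List.dropWhile_cons_of_pos hp, List.takeWhile_cons_of_pos hp]; simpa using ih
    · rw [List.dropWhile_cons_of_neg hp, List.takeWhile_cons_of_neg hp]; simp

lemma cspp_F_cons_lt {x hj : Int} (h : hj < x) (t : List Int) :
    csppF x (hj :: t) = 1 + csppF x t := by
  unfold csppF
  rw [List.takeWhile_cons_of_pos (by simpa using h), List.dropWhile_cons_of_pos (by simpa using h)]
  simp only [List.length_cons]
  push_cast; ring

lemma cspp_F_cons_ge {x hj : Int} (h : x ≤ hj) (t : List Int) :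
    csppF x (hj :: t) = 1 := by
  unfold csppF
  rw [List.takeWhile_cons_of_neg (by simpa using not_lt.mpr h),
      List.dropWhile_cons_of_neg (by simpa using not_lt.mpr h)]
  simp

lemma cspp_vis_some (x : Int) :
    ∀ (r : List Int) (m cnt : Int), m < x →
      csppVisible x (some m) cnt r =
        cnt + csppF x ((csppChain r).dropWhile (fun a => decide (a < m))) := by
  intro r
  induction r with
  | nil => intro m cnt _; simp [csppVisible, csppChain, csppF]
  | cons hj r' ih =>
    intro m cnt hmx
    have hch : csppChain (hj :: r') = hj :: (csppChain r').dropWhile (fun a => decide (a < hj)) := rfl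
    by_cases h1 : m ≤ hj
    · have hp : decide (m ≤ hj) = true := by simpa using h1
      have hdw : (csppChain (hj :: r')).dropWhile (fun a => decide (a < m)) =
          hj :: (csppChain r').dropWhile (fun a => decide (a < hj)) := by
        rw [hch, List.dropWhile_cons_of_neg (by simpa using not_lt.mpr h1)]
      by_cases h2 : x ≤ hj
      · rw [hdw, cspp_F_cons_ge h2]
        simp [csppVisible, hp, h2]
      · have hx : hj < x := lt_of_not_ge h2
        rw [hdw, cspp_F_cons_lt hx]
        simp only [csppVisible, hp, if_true, if_neg h2]
        rw [ih hj (cnt + 1) hx]; ring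
    · have hjm : hj < m := lt_of_not_ge h1
      have hp : decide (m ≤ hj) = false := by simpa using h1
      have hx2 : ¬ x ≤ hj := by omega
      have hdw : (csppChain (hj :: r')).dropWhile (fun a => decide (a < m)) =
          (csppChain r').dropWhile (fun a => decide (a < m)) := by
        rw [hch, List.dropWhile_cons_of_pos (by simpa using hjm)]
        exact cspp_dropWhile_dropWhile (by intro a ha; simp at ha ⊢; omega) _
      rw [hdw, ← ih m cnt hmx]
      simp [csppVisible, hp, hx2]

lemma cspp_vis_none (x : Int) (r : List Int) (cnt : Int) :
    csppVisible x none cnt r = cnt + csppF x (csppChain r) := by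
  cases r with
  | nil => simp [csppVisible, csppChain, csppF]
  | cons hj r' =>
    have hch : csppChain (hj :: r') = hj :: (csppChain r').dropWhile (fun a => decide (a < hj)) := rfl
    by_cases h2 : x ≤ hj
    · rw [hch, cspp_F_cons_ge h2]
      simp [csppVisible, h2]
    · have hx : hj < x := lt_of_not_ge h2
      rw [hch, cspp_F_cons_lt hx]
      simp only [csppVisible, if_neg h2, if_true]
      rw [cspp_vis_some x r' hj (cnt + 1) hx]; ring

-- ---- B's port equals the reference ----

lemma cspp_alt_aux (heights : List Int) :
    ∀ (d : Nat) (k : Nat), k + d = heights.length →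
      (PySem.List.pyRange (k : Int) (heights.length : Int) 1).map
          (fun i => csppVisible (PySem.List.pyGetD heights i 0) none 0
              (PySem.List.slice heights (some (i + 1)) none)) =
        csppAns (heights.drop k) := by
  intro d
  induction d with
  | zero =>
    intro k hk
    rw [PySem.List.pyRange_one_eq_nil (by omega)]
    rw [List.drop_eq_nil_of_le (by omega)]
    rfl
  | succ d ih =>
    intro k hk
    have hkn : k < heights.length := by omega
    rw [PySem.List.pyRange_one_cons (by exact_mod_cast hkn), List.map_cons]
    have h1 : PySem.List.pyGetD heights (k : Int) 0 = heights[k] := by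
      rw [PySem.List.pyGetD_natCast, List.getD_eq_getElem _ _ hkn]
    have h2 : PySem.List.slice heights (some ((k : Int) + 1)) none = heights.drop (k + 1) := by
      rw [show ((k : Int) + 1) = ((k + 1 : Nat) : Int) by push_cast; ring,
          PySem.List.slice_from_natCast]
    have h3 : ((k : Int) + 1) = ((k + 1 : Nat) : Int) := by push_cast; ring
    rw [h1, h2, h3, ih (k + 1) (by omega)]
    rw [List.drop_eq_getElem_cons hkn]
    show _ = csppAns (heights[k] :: heights.drop (k + 1))
    rw [show csppAns (heights[k] :: heights.drop (k + 1)) =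
        csppF heights[k] (csppChain (heights.drop (k + 1))) :: csppAns (heights.drop (k + 1))
        from rfl]
    rw [cspp_vis_none]
    simp

lemma cspp_alt_eq (heights : List Int) : canSeePersonsCount_alt heights = csppAns heights := by
  unfold canSeePersonsCount_alt
  have := cspp_alt_aux heights heights.length 0 (by omega)
  simpa using this

-- ---- A's port equals the reference ----

lemma cspp_pop_eq (heights : List Int) (x : Int) :
    ∀ (stk : List Int) (c : List Int) (res : Int),
      stk.map (fun j => PySem.List.pyGetD heights j 0) = c →
      csppPop heights x stk res =
        (res + ((c.takeWhile (fun a => decide (a < x))).length : Int),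
         stk.drop (c.takeWhile (fun a => decide (a < x))).length) := by
  intro stk
  induction stk with
  | nil => intro c res hc; simp at hc; subst hc; simp [csppPop]
  | cons j s ih =>
    intro c res hc
    subst hc
    by_cases h : PySem.List.pyGetD heights j 0 < x
    · rw [List.map_cons, List.takeWhile_cons_of_pos (by simpa using h)]
      simp only [csppPop, if_pos h]
      rw [ih _ (res + 1) rfl]
      simp only [List.length_cons, List.drop_succ_cons, Prod.mk.injEq]
      exact ⟨by push_cast; ring, trivial⟩
    · rw [List.map_cons, List.takeWhile_cons_of_neg (by simpa using h)]
      simp [csppPop, if_neg h]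

lemma cspp_set_replicate (v : Int) :
    ∀ (m : Nat) (t : List Int),
      (List.replicate (m + 1) (0 : Int) ++ t).set m v = List.replicate m 0 ++ v :: t := by
  intro m
  induction m with
  | zero => intro t; simp
  | succ m ih =>
    intro t
    rw [show List.replicate (m + 2) (0 : Int) = 0 :: List.replicate (m + 1) 0 from rfl]
    rw [List.cons_append, List.set_cons_succ, ih]
    rfl

lemma cspp_loop (heights : List Int) :
    ∀ (m : Nat), m ≤ heights.length → ∀ (stk : List Int),
      stk.map (fun j => PySem.List.pyGetD heights j 0) = csppChain (heights.drop m) →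
      (∀ j ∈ stk, (m : Int) ≤ j ∧ j < (heights.length : Int)) →
      ((PySem.List.pyRange ((m : Int) - 1) (-1) (-1)).foldl (csppStep heights)
          (stk, List.replicate m 0 ++ csppAns (heights.drop m))).2 = csppAns heights := by
  intro m
  induction m with
  | zero =>
    intro _ stk _ _
    rw [PySem.List.pyRange_neg_one_eq_nil (by norm_num)]
    simp
  | succ m ih =>
    intro hm stk hmap hmem
    have hmn : m < heights.length := by omega
    have hrange : ((m + 1 : Nat) : Int) - 1 = (m : Int) := by push_cast; ring
    rw [hrange, PySem.List.pyRange_neg_one_cons (by omega), List.foldl_cons]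
    have hget : PySem.List.pyGetD heights ((m : Nat) : Int) 0 = heights[m] := by
      rw [PySem.List.pyGetD_natCast, List.getD_eq_getElem _ _ hmn]
    have hdropm : heights.drop m = heights[m] :: heights.drop (m + 1) :=
      List.drop_eq_getElem_cons hmn
    have hpop := cspp_pop_eq heights heights[m] stk (csppChain (heights.drop (m + 1))) 0 hmap
    have hdrop_map :
        (stk.drop ((csppChain (heights.drop (m + 1))).takeWhile
            (fun a => decide (a < heights[m]))).length).map
          (fun j => PySem.List.pyGetD heights j 0) =
        (csppChain (heights.drop (m + 1))).dropWhile (fun a => decide (a < heights[m])) := by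
      rw [List.map_drop, hmap, cspp_dropWhile_eq_drop]
    have hres :
        (if stk.drop ((csppChain (heights.drop (m + 1))).takeWhile
              (fun a => decide (a < heights[m]))).length = []
          then (((csppChain (heights.drop (m + 1))).takeWhile
              (fun a => decide (a < heights[m]))).length : Int)
          else (((csppChain (heights.drop (m + 1))).takeWhile
              (fun a => decide (a < heights[m]))).length : Int) + 1) =
        csppF heights[m] (csppChain (heights.drop (m + 1))) := by
      unfold csppF
      by_cases he : stk.drop ((csppChain (heights.drop (m + 1))).takeWhile
          (fun a => decide (a < heights[m]))).length = []
      · rw [if_pos he]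
        have h0 : (csppChain (heights.drop (m + 1))).dropWhile
            (fun a => decide (a < heights[m])) = [] := by
          rw [← hdrop_map, he]; rfl
        rw [if_pos h0]; ring
      · rw [if_neg he]
        have h0 : (csppChain (heights.drop (m + 1))).dropWhile
            (fun a => decide (a < heights[m])) ≠ [] := by
          rw [← hdrop_map]; simpa using he
        rw [if_neg h0]
    have hstep :
        csppStep heights
            (stk, List.replicate (m + 1) 0 ++ csppAns (heights.drop (m + 1))) ((m : Nat) : Int) =
          (((m : Nat) : Int) :: stk.drop ((csppChain (heights.drop (m + 1))).takeWhile
              (fun a => decide (a < heights[m]))).length,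
           List.replicate m 0 ++ csppAns (heights.drop m)) := by
      simp only [csppStep]
      rw [hget, hpop]
      simp only [zero_add]
      rw [hres]
      have htn : ((m : Nat) : Int).toNat = m := by simp
      rw [htn]
      have hans : csppAns (heights.drop m) =
          csppF heights[m] (csppChain (heights.drop (m + 1))) :: csppAns (heights.drop (m + 1)) := by
        rw [hdropm]; rfl
      rw [hans, cspp_set_replicate]
    have hdropAns : csppAns (heights.drop (m + 1)) =
        csppAns (heights.drop ((m : Nat) + 1)) := rfl
    rw [show (List.replicate (m + 1) (0 : Int) ++ csppAns (heights.drop (m + 1))) =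
        (List.replicate (m + 1) 0 ++ csppAns (heights.drop (m + 1))) from rfl]
    rw [hstep]
    apply ih (by omega)
    · rw [List.map_cons, hget, hdrop_map, hdropm]
      rfl
    · intro j hj
      rcases List.mem_cons.mp hj with h | h
      · subst h
        exact ⟨le_refl _, by exact_mod_cast hmn⟩
      · have h2 := hmem j (List.drop_subset _ _ h)
        refine ⟨?_, h2.2⟩
        have h3 : ((m + 1 : Nat) : Int) ≤ j := h2.1
        omega

-- ===== VERDICT (by name: the statement is the Claim_ definition above) =====
theorem canSeePersonsCount_spec : Claim_equal_canSeePersonsCount := by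
  intro heights _
  unfold Spec_canSeePersonsCount
  rw [cspp_alt_eq]
  unfold canSeePersonsCount
  have := cspp_loop heights heights.length (le_refl _) []
  simp only [List.drop_length] at this
  have h2 := this (by rfl) (by intro j hj; simp at hj)
  rw [show csppAns ([] : List Int) = [] from rfl, List.append_nil] at h2
  exact h2
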